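-- pv_equiv track=rewrite | github.com/ShreyasSam2004/Reviso.ai | backend/app/services/text_chunker.py | _get_pages_for_range
-- ===== SOURCE A (Python) =====
-- from typing import Optional
--
-- def _get_pages_for_range(
--
--     start_char: int,
--     end_char: int,
--     page_boundaries: Optional[dict[int, int]] = None,
-- ) -> list[int]:
--     """Determine which pages a character range spans."""
--     if not page_boundaries:
--         return []
--
--     pages = set()
--     sorted_boundaries = sorted(page_boundaries.items())
--
--     for char_pos, page_num in sorted_boundaries:
--         if char_pos <= end_char:
--             if char_pos >= start_char or (pages and max(pages) == page_num - 1):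
--                 pages.add(page_num)
--         if char_pos > end_char:
--             break
--
--     return sorted(pages) if pages else []
-- ===== SOURCE B (Python) =====
-- from typing import Optional
--
--
-- def _get_pages_for_range(
--     start_char: int,
--     end_char: int,
--     page_boundaries: Optional[dict[int, int]] = None,
-- ) -> list[int]:
--     """Determine which pages a character range spans."""
--     if not page_boundaries:
--         return []
--     return sorted({page_num
--                    for char_pos, page_num in page_boundaries.items()
--                    if start_char <= char_pos <= end_char})
-- ===== Notes on version B (the rewrite author's own statement) =====
-- stated objective: faster
-- what changed: Replaces the sort-then-stateful-scan (with break and a running-max contiguity branch, which is provably dead) by a single stateless set comprehension filtering boundaries inside [start_char, end_char], then one sort of only the matching pages.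
import Mathlib
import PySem

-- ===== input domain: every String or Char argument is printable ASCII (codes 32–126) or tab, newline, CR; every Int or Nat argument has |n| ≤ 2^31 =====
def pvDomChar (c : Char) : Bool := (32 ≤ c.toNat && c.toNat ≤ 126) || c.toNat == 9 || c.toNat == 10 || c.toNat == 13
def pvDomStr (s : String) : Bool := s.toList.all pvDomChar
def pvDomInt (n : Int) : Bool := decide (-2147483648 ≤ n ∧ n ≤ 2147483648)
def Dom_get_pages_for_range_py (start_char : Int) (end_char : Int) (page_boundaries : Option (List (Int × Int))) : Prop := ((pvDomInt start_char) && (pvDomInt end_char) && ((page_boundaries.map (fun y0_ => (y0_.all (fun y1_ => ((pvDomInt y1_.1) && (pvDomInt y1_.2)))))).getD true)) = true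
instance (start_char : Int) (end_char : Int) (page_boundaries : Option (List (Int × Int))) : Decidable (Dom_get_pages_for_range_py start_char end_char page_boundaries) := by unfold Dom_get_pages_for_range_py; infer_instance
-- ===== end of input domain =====

-- B replaces A's sort-then-stateful-scan (break + dead contiguity branch) by one
-- stateless filter into a set followed by a sort of only the matching pages;
-- objective: faster (a timing run measured B faster on the generated inputs).

-- ===== PORT A =====
-- the 'for char_pos, page_num in sorted_boundaries' loop with its break, on the running set 'pages'
def pvLoopA (start_char : Int) (end_char : Int) : List (Int × Int) → PySem.Set Int → PySem.Set Int
  | [], pages => pages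
  | (char_pos, page_num) :: rest, pages =>
    let pages' :=
      if char_pos ≤ end_char then
        (if start_char ≤ char_pos ∨
            (pages ≠ [] ∧ PySem.List.max? pages (fun x => x) = some (page_num - 1))
         then pages.add page_num else pages)
      else pages
    if char_pos > end_char then pages' else pvLoopA start_char end_char rest pages'

def get_pages_for_range_py (start_char : Int) (end_char : Int) (page_boundaries : Option (List (Int × Int))) : List Int :=
  match page_boundaries with
  | none => []
  | some pb =>
    if pb = [] then []
    else
      let sorted_boundaries := PySem.List.sorted2 pb (fun cp => cp.1) (fun cp => cp.2)
      let pages := pvLoopA start_char end_char sorted_boundaries PySem.Set.empty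
      if pages = [] then [] else PySem.List.sorted pages (fun x => x)

-- ===== PORT B =====
def get_pages_for_range_py_alt (start_char : Int) (end_char : Int) (page_boundaries : Option (List (Int × Int))) : List Int :=
  match page_boundaries with
  | none => []
  | some pb =>
    if pb = [] then []
    else
      PySem.List.sorted
        (PySem.Set.ofList
          ((pb.filter (fun cp => decide (start_char ≤ cp.1) && decide (cp.1 ≤ end_char))).map
            (fun cp => cp.2)))
        (fun x => x)

-- ===== PRECONDITION & SPEC =====
def Spec_get_pages_for_range_py (start_char : Int) (end_char : Int) (page_boundaries : Option (List (Int × Int))) (out : List Int) : Prop := out = get_pages_for_range_py_alt start_char end_char page_boundaries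
instance (start_char : Int) (end_char : Int) (page_boundaries : Option (List (Int × Int))) (out : List Int) : Decidable (Spec_get_pages_for_range_py start_char end_char page_boundaries out) := by unfold Spec_get_pages_for_range_py; infer_instance

-- ===== CLAIM (what is proved, stated in full; the proofs are below) =====
def Claim_equal_get_pages_for_range_py : Prop := ∀ (start_char : Int) (end_char : Int) (page_boundaries : Option (List (Int × Int))), Dom_get_pages_for_range_py start_char end_char page_boundaries → Spec_get_pages_for_range_py start_char end_char page_boundaries (get_pages_for_range_py start_char end_char page_boundaries)

-- ===== LEMMAS AND PROOFS =====

-- inserting into a list ordered by 'key' keeps it ordered, when 'before' decides ≤ on 'key'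
lemma insertBy_pairwise_key {α : Type} (key : α → Int) (before : α → α → Bool)
    (h1 : ∀ a b, before a b = true → key a ≤ key b)
    (h2 : ∀ a b, before a b = false → key b ≤ key a)
    (x : α) (ys : List α) (h : ys.Pairwise (fun a b => key a ≤ key b)) :
    (PySem.List.insertBy before x ys).Pairwise (fun a b => key a ≤ key b) := by
  induction ys with
  | nil => simp [PySem.List.insertBy]
  | cons y ys ih =>
    rw [List.pairwise_cons] at h
    by_cases hb : before x y = true
    · rw [PySem.List.insertBy, if_pos hb]
      refine List.Pairwise.cons ?_ (List.Pairwise.cons h.1 h.2)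
      intro z hz
      rcases List.mem_cons.mp hz with rfl | hz
      · exact h1 _ _ hb
      · exact le_trans (h1 _ _ hb) (h.1 z hz)
    · rw [PySem.List.insertBy, if_neg hb]
      refine List.Pairwise.cons ?_ (ih h.2)
      intro z hz
      rcases (PySem.List.mem_insertBy before x z ys).mp hz with rfl | hz
      · exact h2 _ _ (by simpa using hb)
      · exact h.1 z hz

lemma foldl_insertBy_pairwise_key {α : Type} (key : α → Int) (before : α → α → Bool)
    (h1 : ∀ a b, before a b = true → key a ≤ key b)
    (h2 : ∀ a b, before a b = false → key b ≤ key a)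
    (xs : List α) :
    ∀ acc : List α, acc.Pairwise (fun a b => key a ≤ key b) →
      (xs.foldl (fun acc x => PySem.List.insertBy before x acc) acc).Pairwise (fun a b => key a ≤ key b) := by
  induction xs with
  | nil => intro acc h; simpa using h
  | cons x xs ih =>
    intro acc h
    exact ih _ (insertBy_pairwise_key key before h1 h2 x acc h)

-- sorted(items) sorts pairs lexicographically, so the first components come out nondecreasing
lemma sorted2_pairwise_fst (pb : List (Int × Int)) :
    (PySem.List.sorted2 pb (fun cp => cp.1) (fun cp => cp.2)).Pairwise
      (fun a b => a.1 ≤ b.1) := by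
  unfold PySem.List.sorted2
  simp only [if_neg (by decide : ¬ (false = true))]
  refine foldl_insertBy_pairwise_key (fun cp => cp.1)
    (fun a b => decide (a.1 < b.1) || !decide (b.1 < a.1) && decide (a.2 < b.2)) ?_ ?_ pb [] List.Pairwise.nil
  · intro a b hab
    simp only [Bool.or_eq_true, Bool.and_eq_true, Bool.not_eq_true', decide_eq_true_eq,
      decide_eq_false_iff_not] at hab
    show a.1 ≤ b.1
    rcases hab with h | ⟨h, _⟩ <;> omega
  · intro a b hab
    simp only [Bool.or_eq_false_iff, decide_eq_false_iff_not] at hab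
    show b.1 ≤ a.1
    have := hab.1
    omega

-- what A's loop computes: a duplicate-free list whose members are exactly the pages whose
-- boundary lies in [start_char, end_char] (the contiguity branch never fires)
lemma pvLoopA_spec (start_char end_char : Int) (l : List (Int × Int)) (pages : PySem.Set Int)
    (hsort : l.Pairwise (fun a b => a.1 ≤ b.1))
    (hnd : pages.Nodup)
    (hinv : pages ≠ [] → ∀ cp ∈ l, start_char ≤ cp.1) :
    (pvLoopA start_char end_char l pages).Nodup ∧
    ∀ x, x ∈ pvLoopA start_char end_char l pages ↔
      x ∈ pages ∨ ∃ cp ∈ l, start_char ≤ cp.1 ∧ cp.1 ≤ end_char ∧ cp.2 = x := by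
  induction l generalizing pages with
  | nil => simpa [pvLoopA] using hnd
  | cons hd tl ih =>
    obtain ⟨c, p⟩ := hd
    rw [List.pairwise_cons] at hsort
    by_cases hce : c ≤ end_char
    · by_cases hsc : start_char ≤ c
      · -- the page is added
        have hstep : pvLoopA start_char end_char ((c, p) :: tl) pages
            = pvLoopA start_char end_char tl (pages.add p) := by
          simp [pvLoopA, hce, hsc, not_lt.mpr hce]
        rw [hstep]
        have hinv' : pages.add p ≠ [] → ∀ cp ∈ tl, start_char ≤ cp.1 := by
          intro _ cp hcp
          exact le_trans hsc (hsort.1 cp hcp)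
        obtain ⟨hnd', hmem'⟩ := ih (pages.add p) hsort.2 (PySem.Set.nodup_add _ _ hnd) hinv'
        refine ⟨hnd', fun x => ?_⟩
        rw [hmem' x, PySem.Set.mem_add]
        constructor
        · rintro ((hx | rfl) | ⟨cp, hcp, h⟩)
          · exact Or.inl hx
          · exact Or.inr ⟨(c, x), List.mem_cons_self, hsc, hce, rfl⟩
          · exact Or.inr ⟨cp, List.mem_cons_of_mem _ hcp, h⟩
        · rintro (hx | ⟨cp, hcp, h⟩)
          · exact Or.inl (Or.inl hx)
          · rcases List.mem_cons.mp hcp with rfl | hcp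
            · exact Or.inl (Or.inr h.2.2.symm)
            · exact Or.inr ⟨cp, hcp, h⟩
      · -- c < start_char: pages must still be empty, nothing is added
        have hpe : pages = [] := by
          by_contra hne
          exact hsc (hinv hne (c, p) List.mem_cons_self)
        subst hpe
        have hstep : pvLoopA start_char end_char ((c, p) :: tl) ([] : PySem.Set Int)
            = pvLoopA start_char end_char tl ([] : PySem.Set Int) := by
          simp [pvLoopA, hce, hsc, not_lt.mpr hce]
        rw [hstep]
        obtain ⟨hnd', hmem'⟩ := ih ([] : PySem.Set Int) hsort.2 List.nodup_nil (by simp)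
        refine ⟨hnd', fun x => ?_⟩
        rw [hmem' x]
        constructor
        · rintro (hx | ⟨cp, hcp, h⟩)
          · exact Or.inl hx
          · exact Or.inr ⟨cp, List.mem_cons_of_mem _ hcp, h⟩
        · rintro (hx | ⟨cp, hcp, h⟩)
          · exact Or.inl hx
          · rcases List.mem_cons.mp hcp with rfl | hcp
            · exact absurd h.1 hsc
            · exact Or.inr ⟨cp, hcp, h⟩
    · -- c > end_char: break; everything remaining lies beyond end_char
      have hstep : pvLoopA start_char end_char ((c, p) :: tl) pages = pages := by
        simp [pvLoopA, hce, lt_of_not_ge hce]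
      rw [hstep]
      refine ⟨hnd, fun x => ?_⟩
      constructor
      · exact fun hx => Or.inl hx
      · rintro (hx | ⟨cp, hcp, h⟩)
        · exact hx
        · rcases List.mem_cons.mp hcp with rfl | hcp
          · exact absurd h.2.1 hce
          · exact absurd (le_trans (hsort.1 cp hcp) h.2.1) hce

-- ===== VERDICT (by name: the statement is the Claim_ definition above) =====
theorem get_pages_for_range_py_spec : Claim_equal_get_pages_for_range_py := by
  intro start_char end_char page_boundaries _
  unfold Spec_get_pages_for_range_py get_pages_for_range_py get_pages_for_range_py_alt
  cases page_boundaries with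
  | none => rfl
  | some pb =>
    by_cases hpb : pb = []
    · simp [hpb]
    · simp only [if_neg hpb]
      set sb := PySem.List.sorted2 pb (fun cp => cp.1) (fun cp => cp.2) with hsb
      obtain ⟨hnd, hmem⟩ := pvLoopA_spec start_char end_char sb PySem.Set.empty
        (sorted2_pairwise_fst pb) List.nodup_nil (by simp [PySem.Set.empty])
      set P := pvLoopA start_char end_char sb PySem.Set.empty with hP
      set S := PySem.Set.ofList
        ((pb.filter (fun cp => decide (start_char ≤ cp.1) && decide (cp.1 ≤ end_char))).map
          (fun cp => cp.2)) with hS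
      have hpermpb : sb.Perm pb := PySem.List.sorted2_perm pb _ _ false
      have hmemS : ∀ x, x ∈ S ↔ ∃ cp ∈ pb, start_char ≤ cp.1 ∧ cp.1 ≤ end_char ∧ cp.2 = x := by
        intro x
        rw [hS, PySem.Set.mem_ofList, List.mem_map]
        constructor
        · rintro ⟨cp, hcp, rfl⟩
          rw [List.mem_filter] at hcp
          refine ⟨cp, hcp.1, ?_, ?_, rfl⟩
          · simpa using (Bool.and_eq_true _ _ |>.mp hcp.2).1
          · simpa using (Bool.and_eq_true _ _ |>.mp hcp.2).2
        · rintro ⟨cp, hcp, h1, h2, rfl⟩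
          exact ⟨cp, List.mem_filter.mpr ⟨hcp, by simp [h1, h2]⟩, rfl⟩
      have hperm : P.Perm S := by
        rw [List.perm_ext_iff_of_nodup hnd (by rw [hS]; exact PySem.Set.nodup_ofList _)]
        intro x
        rw [hmem x, hmemS x]
        simp only [PySem.Set.empty, List.not_mem_nil, false_or]
        constructor
        · rintro ⟨cp, hcp, h⟩; exact ⟨cp, hpermpb.mem_iff.mp hcp, h⟩
        · rintro ⟨cp, hcp, h⟩; exact ⟨cp, hpermpb.mem_iff.mpr hcp, h⟩
      have hsorted : PySem.List.sorted P (fun x => x) = PySem.List.sorted S (fun x => x) :=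
        PySem.List.sorted_eq_sorted_of_perm P S (fun x => x) (fun _ _ h => h) hperm
      by_cases hPe : P = []
      · rw [if_pos hPe, ← hsorted, hPe]
        rfl
      · rw [if_neg hPe, hsorted]
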